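-- pv_equiv track=rewrite | github.com/stickerdaniel/linkedin-mcp-server | linkedin_mcp_server/tools/page.py | _matches_supported_route
-- ===== SOURCE A (Python) =====
-- _SUPPORTED_ROUTE_FAMILIES = (
--     "/school/",
--     "/showcase/",
--     "/newsletters/",
--     "/pulse/",
--     "/feed/update/",
--     "/events/",
--     "/groups",
--     "/services",
--     "/products",
-- )
--
-- def _matches_supported_route(path: str) -> bool:
--     """Return True when the path matches one of the supported route families."""
--     for prefix in _SUPPORTED_ROUTE_FAMILIES:
--         if prefix.endswith("/"):
--             if path.startswith(prefix):
--                 return True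
--             continue
--         if path == prefix or path.startswith(f"{prefix}/"):
--             return True
--     return False
-- ===== SOURCE B (Python) =====
-- # Segment dispatch: instead of scanning the route families, parse the first
-- # path segment and look up its rule in a table.
-- _SEGMENT_RULES = {
--     "school": "prefix",
--     "showcase": "prefix",
--     "newsletters": "prefix",
--     "pulse": "prefix",
--     "events": "prefix",
--     "feed": "feed",
--     "groups": "both",
--     "services": "both",
--     "products": "both",
-- }
--
-- def _matches_supported_route(path: str) -> bool:
--     """Return True when the path matches one of the supported route families."""
--     if not path.startswith("/"):
--         return False
--     sep = path.find("/", 1)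
--     seg = path[1:] if sep == -1 else path[1:sep]
--     rule = _SEGMENT_RULES.get(seg)
--     if rule is None:
--         return False
--     if rule == "feed":
--         return path.startswith("/feed/update/")
--     if sep == -1:
--         return rule == "both"
--     return True
-- ===== Notes on version B (the rewrite author's own statement) =====
-- stated objective: alternative
-- what changed: Instead of scanning the tuple of route families with per-element branch logic, B parses the first path segment once (locating the second slash) and dispatches on it via a single rules-table lookup, with a dedicated prefix check only for the one two-segment feed family.
import Mathlib
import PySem

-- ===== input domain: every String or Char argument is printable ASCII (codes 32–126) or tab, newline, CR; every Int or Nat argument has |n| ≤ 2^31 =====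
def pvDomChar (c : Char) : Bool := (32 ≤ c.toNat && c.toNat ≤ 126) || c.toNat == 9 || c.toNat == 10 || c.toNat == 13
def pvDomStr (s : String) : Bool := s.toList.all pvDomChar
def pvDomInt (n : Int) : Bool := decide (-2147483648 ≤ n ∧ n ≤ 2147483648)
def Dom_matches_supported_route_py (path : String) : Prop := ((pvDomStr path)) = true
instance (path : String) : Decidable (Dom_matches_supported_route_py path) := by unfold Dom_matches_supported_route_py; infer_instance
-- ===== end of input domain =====

-- B replaces A's scan over the route families by segment dispatch: it parses the first
-- path segment once and looks up its rule in a table; equal return values (alternative).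

-- ===== PORT A =====
def pvFamiliesA : List String :=
  ["/school/", "/showcase/", "/newsletters/", "/pulse/", "/feed/update/",
   "/events/", "/groups", "/services", "/products"]

def pvLoopA (path : String) : List String → Bool
  | [] => false
  | prefix_ :: rest =>
    if PySem.Str.endswith prefix_ "/" then
      if PySem.Str.startswith path prefix_ then true else pvLoopA path rest
    else
      if path == prefix_ || PySem.Str.startswith path (prefix_ ++ "/") then true
      else pvLoopA path rest

def matches_supported_route_py (path : String) : Bool := pvLoopA path pvFamiliesA

-- ===== PORT B =====
def pvSegmentRules : PySem.Dict String String :=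
  PySem.Dict.mk
    [("school", "prefix"), ("showcase", "prefix"), ("newsletters", "prefix"),
     ("pulse", "prefix"), ("events", "prefix"), ("feed", "feed"),
     ("groups", "both"), ("services", "both"), ("products", "both")]

def matches_supported_route_py_alt (path : String) : Bool :=
  if PySem.Str.startswith path "/" = false then false
  else
    let sep : Int := PySem.Str.findFrom path "/" 1
    let seg : String :=
      if sep == -1 then PySem.Str.slice path (some 1) none
      else PySem.Str.slice path (some 1) (some sep)
    match pvSegmentRules.get? seg with
    | none => false
    | some rule =>
      if rule == "feed" then PySem.Str.startswith path "/feed/update/"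
      else if sep == -1 then rule == "both"
      else true

-- ===== PRECONDITION & SPEC =====
def Spec_matches_supported_route_py (path : String) (out : Bool) : Prop := out = matches_supported_route_py_alt path
instance (path : String) (out : Bool) : Decidable (Spec_matches_supported_route_py path out) := by unfold Spec_matches_supported_route_py; infer_instance

-- ===== CLAIM (what is proved, stated in full; the proofs are below) =====
def Claim_equal_matches_supported_route_py : Prop := ∀ (path : String), Dom_matches_supported_route_py path → Spec_matches_supported_route_py path (matches_supported_route_py path)

-- ===== LEMMAS AND PROOFS =====

-- A's loop as a single `any` over the family list.
theorem pvLoopA_eq_any (path : String) (l : List String) :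
    pvLoopA path l =
      l.any (fun p =>
        if PySem.Str.endswith p "/" then PySem.Str.startswith path p
        else path == p || PySem.Str.startswith path (p ++ "/")) := by
  induction l with
  | nil => rfl
  | cons p rest ih =>
    simp only [pvLoopA, List.any_cons, ih]
    by_cases h : PySem.Str.endswith p "/" = true
    · simp only [h, if_true]
      by_cases hs : PySem.Str.startswith path p = true <;> simp
    · simp only [Bool.not_eq_true] at h
      simp only [h, Bool.false_eq_true, if_false]
      have hb : (path == p) = decide (path = p) := by
        by_cases hp : path = p <;> simp [hp]
      rw [hb]
      by_cases hc : (decide (path = p) || PySem.Str.startswith path (p ++ "/")) = true <;> simp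

-- A's result as a proposition on the character list.
def pvAProp (cs : List Char) : Prop :=
  "/school/".toList <+: cs ∨ "/showcase/".toList <+: cs ∨ "/newsletters/".toList <+: cs ∨
  "/pulse/".toList <+: cs ∨ "/feed/update/".toList <+: cs ∨ "/events/".toList <+: cs ∨
  (cs = "/groups".toList ∨ "/groups/".toList <+: cs) ∨
  (cs = "/services".toList ∨ "/services/".toList <+: cs) ∨
  (cs = "/products".toList ∨ "/products/".toList <+: cs)

theorem pv_A_iff (path : String) : matches_supported_route_py path = true ↔ pvAProp path.toList := by
  have e1 : PySem.Str.endswith "/school/" "/" = true := by decide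
  have e2 : PySem.Str.endswith "/showcase/" "/" = true := by decide
  have e3 : PySem.Str.endswith "/newsletters/" "/" = true := by decide
  have e4 : PySem.Str.endswith "/pulse/" "/" = true := by decide
  have e5 : PySem.Str.endswith "/feed/update/" "/" = true := by decide
  have e6 : PySem.Str.endswith "/events/" "/" = true := by decide
  have e7 : PySem.Str.endswith "/groups" "/" = false := by decide
  have e8 : PySem.Str.endswith "/services" "/" = false := by decide
  have e9 : PySem.Str.endswith "/products" "/" = false := by decide
  have f1 : ("/groups" : String) ++ "/" = "/groups/" := by decide
  have f2 : ("/services" : String) ++ "/" = "/services/" := by decide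
  have f3 : ("/products" : String) ++ "/" = "/products/" := by decide
  rw [matches_supported_route_py, pvLoopA_eq_any]
  simp only [pvFamiliesA, List.any_cons, List.any_nil,
    e1, e2, e3, e4, e5, e6, e7, e8, e9, f1, f2, f3, if_true, Bool.false_eq_true, if_false]
  simp only [Bool.or_eq_true, PySem.Str.startswith_eq, PySem.Chars.startswith_iff,
    beq_iff_eq, Bool.false_eq_true, or_false]
  rw [pvAProp]
  simp only [← String.toList_inj]

-- a word followed by '/' is a prefix of w ++ '/'::u (w slash-free) iff it IS w
theorem pv_prefix_slash (x : List Char) : ∀ (w u : List Char), '/' ∉ x → '/' ∉ w →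
    ((x ++ ['/']) <+: (w ++ '/' :: u) ↔ x = w) := by
  induction x with
  | nil =>
    intro w u _ hw
    constructor
    · intro h
      cases w with
      | nil => rfl
      | cons d w' =>
        have hd : '/' = d := by simpa using h
        exact absurd (hd ▸ List.mem_cons_self) hw
    · rintro rfl; simpa using List.prefix_append ['/'] u
  | cons c x' ih =>
    intro w u hx hw
    constructor
    · intro h
      cases w with
      | nil =>
        rcases List.cons_prefix_cons.mp (by simpa using h) with ⟨hd, -⟩
        exact absurd (hd ▸ List.mem_cons_self) hx
      | cons d w' =>
        rcases List.cons_prefix_cons.mp (by simpa using h) with ⟨hd, htl⟩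
        have := (ih w' u (fun hm => hx (List.mem_cons_of_mem _ hm))
          (fun hm => hw (List.mem_cons_of_mem _ hm))).mp htl
        simp [hd, this]
    · rintro rfl
      have : (c :: x') ++ '/' :: u = ((c :: x') ++ ['/']) ++ u := by simp
      rw [this]; exact List.prefix_append _ _

-- turning one disjunct of A into a statement about the first segment
theorem pv_disj_w (x w u : List Char) (hx : '/' ∉ x) (hw : '/' ∉ w) :
    ('/' :: (x ++ ['/'])) <+: ('/' :: (w ++ '/' :: u)) ↔ x = w := by
  rw [List.cons_prefix_cons]
  simp [pv_prefix_slash x w u hx hw]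

set_option maxHeartbeats 1000000 in
theorem pv_ab_eq (path : String) :
    matches_supported_route_py path = matches_supported_route_py_alt path := by
  rw [Bool.eq_iff_iff, pv_A_iff]
  by_cases hsw : PySem.Str.startswith path "/" = true
  · obtain ⟨rest, hcs⟩ : ∃ rest, path.toList = '/' :: rest := by
      have h := (PySem.Chars.startswith_iff path.toList "/".toList).mp (by simpa using hsw)
      rcases h with ⟨t, ht⟩
      exact ⟨t, by simpa using ht.symm⟩
    have hsw' : PySem.Chars.startswith path.toList ['/'] = true := by simpa using hsw
    have hff : PySem.Chars.findFrom path.toList ['/'] 1 =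
        (if PySem.Chars.find rest ['/'] = -1 then -1 else 1 + PySem.Chars.find rest ['/']) := by
      have hk : (1 : Nat) ≤ path.toList.length := by rw [hcs]; simp
      have h := PySem.Chars.findFrom_natCast path.toList ['/'] 1 hk
      rw [hcs] at h
      rw [hcs]
      simpa using h
    by_cases hj : PySem.Chars.find rest ['/'] = -1
    · -- rest contains no '/'
      have hnos : '/' ∉ rest := by
        intro hm
        exact (PySem.Chars.find_ne_neg_one_iff rest ['/']).mpr
          ((List.singleton_infix_iff _ _).mpr hm) hj
      have hsegL : (PySem.Str.slice path (some 1) none).toList = rest := by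
        simp [PySem.List.slice_from_one, hcs]
      have hBe : matches_supported_route_py_alt path =
          (match pvSegmentRules.get? (PySem.Str.slice path (some 1) none) with
            | none => false
            | some rule =>
              if rule == "feed" then PySem.Str.startswith path "/feed/update/"
              else rule == "both") := by
        simp [matches_supported_route_py_alt, hsw', hff, hj]
      rw [hBe]
      by_cases h1 : rest = "school".toList
      · have hseq : PySem.Str.slice path (some 1) none = "school" :=
          String.toList_inj.mp (by rw [hsegL, h1])
        rw [hseq]
        unfold pvAProp
        simp only [PySem.Str.startswith_eq]
        rw [hcs, h1]
        decide
      by_cases h2 : rest = "showcase".toList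
      · have hseq : PySem.Str.slice path (some 1) none = "showcase" :=
          String.toList_inj.mp (by rw [hsegL, h2])
        rw [hseq]
        unfold pvAProp
        simp only [PySem.Str.startswith_eq]
        rw [hcs, h2]
        decide
      by_cases h3 : rest = "newsletters".toList
      · have hseq : PySem.Str.slice path (some 1) none = "newsletters" :=
          String.toList_inj.mp (by rw [hsegL, h3])
        rw [hseq]
        unfold pvAProp
        simp only [PySem.Str.startswith_eq]
        rw [hcs, h3]
        decide
      by_cases h4 : rest = "pulse".toList
      · have hseq : PySem.Str.slice path (some 1) none = "pulse" :=
          String.toList_inj.mp (by rw [hsegL, h4])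
        rw [hseq]
        unfold pvAProp
        simp only [PySem.Str.startswith_eq]
        rw [hcs, h4]
        decide
      by_cases h5 : rest = "events".toList
      · have hseq : PySem.Str.slice path (some 1) none = "events" :=
          String.toList_inj.mp (by rw [hsegL, h5])
        rw [hseq]
        unfold pvAProp
        simp only [PySem.Str.startswith_eq]
        rw [hcs, h5]
        decide
      by_cases h6 : rest = "feed".toList
      · have hseq : PySem.Str.slice path (some 1) none = "feed" :=
          String.toList_inj.mp (by rw [hsegL, h6])
        rw [hseq]
        unfold pvAProp
        simp only [PySem.Str.startswith_eq]
        rw [hcs, h6]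
        decide
      by_cases h7 : rest = "groups".toList
      · have hseq : PySem.Str.slice path (some 1) none = "groups" :=
          String.toList_inj.mp (by rw [hsegL, h7])
        rw [hseq]
        unfold pvAProp
        simp only [PySem.Str.startswith_eq]
        rw [hcs, h7]
        decide
      by_cases h8 : rest = "services".toList
      · have hseq : PySem.Str.slice path (some 1) none = "services" :=
          String.toList_inj.mp (by rw [hsegL, h8])
        rw [hseq]
        unfold pvAProp
        simp only [PySem.Str.startswith_eq]
        rw [hcs, h8]
        decide
      by_cases h9 : rest = "products".toList
      · have hseq : PySem.Str.slice path (some 1) none = "products" :=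
          String.toList_inj.mp (by rw [hsegL, h9])
        rw [hseq]
        unfold pvAProp
        simp only [PySem.Str.startswith_eq]
        rw [hcs, h9]
        decide
      -- no rule matches: both sides false
      have hk : ∀ (w : String), rest ≠ w.toList → (w == PySem.Str.slice path (some 1) none) = false := by
        intro w hne
        rw [beq_eq_false_iff_ne]
        intro e
        exact hne (by rw [← hsegL, ← e])
      have hnone : pvSegmentRules.get? (PySem.Str.slice path (some 1) none) = none := by
        simp [pvSegmentRules, PySem.Dict.get?,
          hk "school" h1, hk "showcase" h2, hk "newsletters" h3, hk "pulse" h4,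
          hk "events" h5, hk "feed" h6, hk "groups" h7, hk "services" h8, hk "products" h9]
      rw [hnone]
      simp only [Bool.false_eq_true, iff_false]
      intro hA
      unfold pvAProp at hA
      rw [hcs] at hA
      rcases hA with h|h|h|h|h|h|(h|h)|(h|h)|(h|h)
      · rw [show "/school/".toList = '/' :: "school/".toList from by decide, List.cons_prefix_cons] at h
        exact hnos (h.2.subset (by decide))
      · rw [show "/showcase/".toList = '/' :: "showcase/".toList from by decide, List.cons_prefix_cons] at h
        exact hnos (h.2.subset (by decide))
      · rw [show "/newsletters/".toList = '/' :: "newsletters/".toList from by decide, List.cons_prefix_cons] at h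
        exact hnos (h.2.subset (by decide))
      · rw [show "/pulse/".toList = '/' :: "pulse/".toList from by decide, List.cons_prefix_cons] at h
        exact hnos (h.2.subset (by decide))
      · rw [show "/feed/update/".toList = '/' :: "feed/update/".toList from by decide, List.cons_prefix_cons] at h
        exact hnos (h.2.subset (by decide))
      · rw [show "/events/".toList = '/' :: "events/".toList from by decide, List.cons_prefix_cons] at h
        exact hnos (h.2.subset (by decide))
      · rw [show "/groups".toList = '/' :: "groups".toList from by decide] at h
        injection h with _ h'
        exact h7 h'
      · rw [show "/groups/".toList = '/' :: "groups/".toList from by decide, List.cons_prefix_cons] at h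
        exact hnos (h.2.subset (by decide))
      · rw [show "/services".toList = '/' :: "services".toList from by decide] at h
        injection h with _ h'
        exact h8 h'
      · rw [show "/services/".toList = '/' :: "services/".toList from by decide, List.cons_prefix_cons] at h
        exact hnos (h.2.subset (by decide))
      · rw [show "/products".toList = '/' :: "products".toList from by decide] at h
        injection h with _ h'
        exact h9 h'
      · rw [show "/products/".toList = '/' :: "products/".toList from by decide, List.cons_prefix_cons] at h
        exact hnos (h.2.subset (by decide))
    · -- rest has a '/' at position n
      have hinf : ['/'] <:+: rest := (PySem.Chars.find_ne_neg_one_iff rest ['/']).mp hj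
      have hnn : 0 ≤ PySem.Chars.find rest ['/'] := (PySem.Chars.find_nonneg_iff rest ['/']).mpr hinf
      set j := PySem.Chars.find rest ['/'] with hjdef
      set n := j.toNat with hndef
      have h0 : PySem.Chars.findFrom rest ['/'] ((0 : Nat) : Int) = j := by
        simpa [hjdef] using PySem.Chars.findFrom_zero rest ['/']
      have hspec := PySem.Chars.findFrom_natCast_spec rest ['/'] 0 (Nat.zero_le _) (by rw [h0]; exact hj)
      rw [h0] at hspec
      obtain ⟨-, hpre, hmin⟩ := hspec
      obtain ⟨u, hu⟩ : ∃ u, List.drop n rest = '/' :: u := by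
        rcases hpre with ⟨t, ht⟩
        exact ⟨t, ht.symm⟩
      set w := List.take n rest with hwdef
      have hnlt : n < rest.length := by
        by_contra hge
        push_neg at hge
        rw [List.drop_of_length_le hge] at hu
        cases hu
      have hwns : '/' ∉ w := by
        intro hm
        obtain ⟨i, hi, hei⟩ := List.getElem_of_mem hm
        have hiw : i < n := lt_of_lt_of_le hi (by rw [hwdef, List.length_take]; exact Nat.min_le_left _ _)
        have hir : i < rest.length := lt_trans hiw hnlt
        apply hmin i (Nat.zero_le _) hiw
        have hre : rest[i] = '/' := by
          have h' := hei
          simp only [hwdef, List.getElem_take] at h'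
          exact h'
        have hd : List.drop i rest = '/' :: List.drop (i + 1) rest := by
          rw [List.drop_eq_getElem_cons hir, hre]
        rw [hd]
        exact ⟨_, rfl⟩
      have hrest : rest = w ++ '/' :: u := by
        conv_lhs => rw [← List.take_append_drop n rest]
        rw [hu, hwdef]
      have hne1 : ((1 + j : Int) == -1) = false := by
        rw [beq_eq_false_iff_ne]
        omega
      have htn : ((1 + j).toNat - (1 : Int).toNat) = n := by omega
      have hsegL : (PySem.Str.slice path (some 1) (some (1 + j))).toList = w := by
        simp only [PySem.Str.toList_slice, PySem.Chars.slice_eq_listSlice]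
        rw [PySem.List.slice_toNat _ (by omega) (by omega), htn, hcs]
        simp [hwdef]
      have hBe : matches_supported_route_py_alt path =
          (match pvSegmentRules.get? (PySem.Str.slice path (some 1) (some (1 + j))) with
            | none => false
            | some rule =>
              if rule == "feed" then PySem.Str.startswith path "/feed/update/"
              else true) := by
        simp [matches_supported_route_py_alt, hsw', hff, hj, hne1]
      rw [hBe]
      have g1 : pvSegmentRules.get? "school" = some "prefix" := by decide
      have g2 : pvSegmentRules.get? "showcase" = some "prefix" := by decide
      have g3 : pvSegmentRules.get? "newsletters" = some "prefix" := by decide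
      have g4 : pvSegmentRules.get? "pulse" = some "prefix" := by decide
      have g5 : pvSegmentRules.get? "events" = some "prefix" := by decide
      have g6 : pvSegmentRules.get? "feed" = some "feed" := by decide
      have g7 : pvSegmentRules.get? "groups" = some "both" := by decide
      have g8 : pvSegmentRules.get? "services" = some "both" := by decide
      have g9 : pvSegmentRules.get? "products" = some "both" := by decide
      by_cases h1 : w = "school".toList
      · have hseq : PySem.Str.slice path (some 1) (some (1 + j)) = "school" :=
          String.toList_inj.mp (by rw [hsegL, h1])
        rw [hseq, g1]
        have hApf : pvAProp path.toList := by
          unfold pvAProp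
          refine Or.inl ?_
          rw [hcs, hrest, h1, show "/school/".toList = '/' :: ("school".toList ++ ['/']) from by decide]
          exact (pv_disj_w _ _ _ (by decide) (by decide)).mpr rfl
        simp [hApf]
      by_cases h2 : w = "showcase".toList
      · have hseq : PySem.Str.slice path (some 1) (some (1 + j)) = "showcase" :=
          String.toList_inj.mp (by rw [hsegL, h2])
        rw [hseq, g2]
        have hApf : pvAProp path.toList := by
          unfold pvAProp
          refine Or.inr (Or.inl ?_)
          rw [hcs, hrest, h2, show "/showcase/".toList = '/' :: ("showcase".toList ++ ['/']) from by decide]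
          exact (pv_disj_w _ _ _ (by decide) (by decide)).mpr rfl
        simp [hApf]
      by_cases h3 : w = "newsletters".toList
      · have hseq : PySem.Str.slice path (some 1) (some (1 + j)) = "newsletters" :=
          String.toList_inj.mp (by rw [hsegL, h3])
        rw [hseq, g3]
        have hApf : pvAProp path.toList := by
          unfold pvAProp
          refine Or.inr (Or.inr (Or.inl ?_))
          rw [hcs, hrest, h3, show "/newsletters/".toList = '/' :: ("newsletters".toList ++ ['/']) from by decide]
          exact (pv_disj_w _ _ _ (by decide) (by decide)).mpr rfl
        simp [hApf]
      by_cases h4 : w = "pulse".toList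
      · have hseq : PySem.Str.slice path (some 1) (some (1 + j)) = "pulse" :=
          String.toList_inj.mp (by rw [hsegL, h4])
        rw [hseq, g4]
        have hApf : pvAProp path.toList := by
          unfold pvAProp
          refine Or.inr (Or.inr (Or.inr (Or.inl ?_)))
          rw [hcs, hrest, h4, show "/pulse/".toList = '/' :: ("pulse".toList ++ ['/']) from by decide]
          exact (pv_disj_w _ _ _ (by decide) (by decide)).mpr rfl
        simp [hApf]
      by_cases h5 : w = "events".toList
      · have hseq : PySem.Str.slice path (some 1) (some (1 + j)) = "events" :=
          String.toList_inj.mp (by rw [hsegL, h5])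
        rw [hseq, g5]
        have hApf : pvAProp path.toList := by
          unfold pvAProp
          refine Or.inr (Or.inr (Or.inr (Or.inr (Or.inr (Or.inl ?_)))))
          rw [hcs, hrest, h5, show "/events/".toList = '/' :: ("events".toList ++ ['/']) from by decide]
          exact (pv_disj_w _ _ _ (by decide) (by decide)).mpr rfl
        simp [hApf]
      by_cases h6 : w = "feed".toList
      · have hseq : PySem.Str.slice path (some 1) (some (1 + j)) = "feed" :=
          String.toList_inj.mp (by rw [hsegL, h6])
        rw [hseq, g6]
        have hSW : PySem.Str.startswith path "/feed/update/" = true ↔ "/feed/update/".toList <+: path.toList := by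
          simp [PySem.Chars.startswith_iff]
        have hred : (match (some "feed" : Option String) with
            | none => false
            | some rule =>
              if rule == "feed" then PySem.Str.startswith path "/feed/update/"
              else true) = PySem.Str.startswith path "/feed/update/" := by simp
        rw [hred]
        unfold pvAProp
        constructor
        · intro hA
          rcases hA with h|h|h|h|h|h|(h|h)|(h|h)|(h|h)
          · rw [hcs, hrest, show "/school/".toList = '/' :: ("school".toList ++ ['/']) from by decide] at h
            have hxw := (pv_disj_w _ _ _ (by decide) hwns).mp h
            rw [h6] at hxw
            exact absurd hxw (by decide)
          · rw [hcs, hrest, show "/showcase/".toList = '/' :: ("showcase".toList ++ ['/']) from by decide] at h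
            have hxw := (pv_disj_w _ _ _ (by decide) hwns).mp h
            rw [h6] at hxw
            exact absurd hxw (by decide)
          · rw [hcs, hrest, show "/newsletters/".toList = '/' :: ("newsletters".toList ++ ['/']) from by decide] at h
            have hxw := (pv_disj_w _ _ _ (by decide) hwns).mp h
            rw [h6] at hxw
            exact absurd hxw (by decide)
          · rw [hcs, hrest, show "/pulse/".toList = '/' :: ("pulse".toList ++ ['/']) from by decide] at h
            have hxw := (pv_disj_w _ _ _ (by decide) hwns).mp h
            rw [h6] at hxw
            exact absurd hxw (by decide)
          · exact hSW.mpr h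
          · rw [hcs, hrest, show "/events/".toList = '/' :: ("events".toList ++ ['/']) from by decide] at h
            have hxw := (pv_disj_w _ _ _ (by decide) hwns).mp h
            rw [h6] at hxw
            exact absurd hxw (by decide)
          · rw [hcs, hrest, show "/groups".toList = '/' :: "groups".toList from by decide] at h
            injection h with _ h'
            have hmm : '/' ∈ "groups".toList := h' ▸ (by simp)
            exact absurd hmm (by decide)
          · rw [hcs, hrest, show "/groups/".toList = '/' :: ("groups".toList ++ ['/']) from by decide] at h
            have hxw := (pv_disj_w _ _ _ (by decide) hwns).mp h
            rw [h6] at hxw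
            exact absurd hxw (by decide)
          · rw [hcs, hrest, show "/services".toList = '/' :: "services".toList from by decide] at h
            injection h with _ h'
            have hmm : '/' ∈ "services".toList := h' ▸ (by simp)
            exact absurd hmm (by decide)
          · rw [hcs, hrest, show "/services/".toList = '/' :: ("services".toList ++ ['/']) from by decide] at h
            have hxw := (pv_disj_w _ _ _ (by decide) hwns).mp h
            rw [h6] at hxw
            exact absurd hxw (by decide)
          · rw [hcs, hrest, show "/products".toList = '/' :: "products".toList from by decide] at h
            injection h with _ h'
            have hmm : '/' ∈ "products".toList := h' ▸ (by simp)
            exact absurd hmm (by decide)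
          · rw [hcs, hrest, show "/products/".toList = '/' :: ("products".toList ++ ['/']) from by decide] at h
            have hxw := (pv_disj_w _ _ _ (by decide) hwns).mp h
            rw [h6] at hxw
            exact absurd hxw (by decide)
        · intro hB'
          exact Or.inr (Or.inr (Or.inr (Or.inr (Or.inl (hSW.mp hB')))))
      by_cases h7 : w = "groups".toList
      · have hseq : PySem.Str.slice path (some 1) (some (1 + j)) = "groups" :=
          String.toList_inj.mp (by rw [hsegL, h7])
        rw [hseq, g7]
        have hApf : pvAProp path.toList := by
          unfold pvAProp
          refine Or.inr (Or.inr (Or.inr (Or.inr (Or.inr (Or.inr (Or.inl (Or.inr ?_)))))))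
          rw [hcs, hrest, h7, show "/groups/".toList = '/' :: ("groups".toList ++ ['/']) from by decide]
          exact (pv_disj_w _ _ _ (by decide) (by decide)).mpr rfl
        simp [hApf]
      by_cases h8 : w = "services".toList
      · have hseq : PySem.Str.slice path (some 1) (some (1 + j)) = "services" :=
          String.toList_inj.mp (by rw [hsegL, h8])
        rw [hseq, g8]
        have hApf : pvAProp path.toList := by
          unfold pvAProp
          refine Or.inr (Or.inr (Or.inr (Or.inr (Or.inr (Or.inr (Or.inr (Or.inl (Or.inr ?_))))))))
          rw [hcs, hrest, h8, show "/services/".toList = '/' :: ("services".toList ++ ['/']) from by decide]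
          exact (pv_disj_w _ _ _ (by decide) (by decide)).mpr rfl
        simp [hApf]
      by_cases h9 : w = "products".toList
      · have hseq : PySem.Str.slice path (some 1) (some (1 + j)) = "products" :=
          String.toList_inj.mp (by rw [hsegL, h9])
        rw [hseq, g9]
        have hApf : pvAProp path.toList := by
          unfold pvAProp
          refine Or.inr (Or.inr (Or.inr (Or.inr (Or.inr (Or.inr (Or.inr (Or.inr (Or.inr ?_))))))))
          rw [hcs, hrest, h9, show "/products/".toList = '/' :: ("products".toList ++ ['/']) from by decide]
          exact (pv_disj_w _ _ _ (by decide) (by decide)).mpr rfl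
        simp [hApf]
      have hk : ∀ (x : String), w ≠ x.toList → (x == PySem.Str.slice path (some 1) (some (1 + j))) = false := by
        intro x hne
        rw [beq_eq_false_iff_ne]
        intro e
        exact hne (by rw [← hsegL, ← e])
      have hnone : pvSegmentRules.get? (PySem.Str.slice path (some 1) (some (1 + j))) = none := by
        simp [pvSegmentRules, PySem.Dict.get?,
          hk "school" h1, hk "showcase" h2, hk "newsletters" h3, hk "pulse" h4,
          hk "events" h5, hk "feed" h6, hk "groups" h7, hk "services" h8, hk "products" h9]
      rw [hnone]
      simp only [Bool.false_eq_true, iff_false]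
      intro hA
      unfold pvAProp at hA
      rcases hA with h|h|h|h|h|h|(h|h)|(h|h)|(h|h)
      · rw [hcs, hrest, show "/school/".toList = '/' :: ("school".toList ++ ['/']) from by decide] at h
        exact h1 ((pv_disj_w _ _ _ (by decide) hwns).mp h).symm
      · rw [hcs, hrest, show "/showcase/".toList = '/' :: ("showcase".toList ++ ['/']) from by decide] at h
        exact h2 ((pv_disj_w _ _ _ (by decide) hwns).mp h).symm
      · rw [hcs, hrest, show "/newsletters/".toList = '/' :: ("newsletters".toList ++ ['/']) from by decide] at h
        exact h3 ((pv_disj_w _ _ _ (by decide) hwns).mp h).symm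
      · rw [hcs, hrest, show "/pulse/".toList = '/' :: ("pulse".toList ++ ['/']) from by decide] at h
        exact h4 ((pv_disj_w _ _ _ (by decide) hwns).mp h).symm
      · have h2f : "/feed/".toList <+: path.toList := (by decide : "/feed/".toList <+: "/feed/update/".toList).trans h
        rw [hcs, hrest, show "/feed/".toList = '/' :: ("feed".toList ++ ['/']) from by decide] at h2f
        exact h6 ((pv_disj_w _ _ _ (by decide) hwns).mp h2f).symm
      · rw [hcs, hrest, show "/events/".toList = '/' :: ("events".toList ++ ['/']) from by decide] at h
        exact h5 ((pv_disj_w _ _ _ (by decide) hwns).mp h).symm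
      · rw [hcs, hrest, show "/groups".toList = '/' :: "groups".toList from by decide] at h
        injection h with _ h'
        have hmm : '/' ∈ "groups".toList := h' ▸ (by simp)
        exact absurd hmm (by decide)
      · rw [hcs, hrest, show "/groups/".toList = '/' :: ("groups".toList ++ ['/']) from by decide] at h
        exact h7 ((pv_disj_w _ _ _ (by decide) hwns).mp h).symm
      · rw [hcs, hrest, show "/services".toList = '/' :: "services".toList from by decide] at h
        injection h with _ h'
        have hmm : '/' ∈ "services".toList := h' ▸ (by simp)
        exact absurd hmm (by decide)
      · rw [hcs, hrest, show "/services/".toList = '/' :: ("services".toList ++ ['/']) from by decide] at h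
        exact h8 ((pv_disj_w _ _ _ (by decide) hwns).mp h).symm
      · rw [hcs, hrest, show "/products".toList = '/' :: "products".toList from by decide] at h
        injection h with _ h'
        have hmm : '/' ∈ "products".toList := h' ▸ (by simp)
        exact absurd hmm (by decide)
      · rw [hcs, hrest, show "/products/".toList = '/' :: ("products".toList ++ ['/']) from by decide] at h
        exact h9 ((pv_disj_w _ _ _ (by decide) hwns).mp h).symm
  · -- path does not start with '/': both sides are false
    have hns : ¬ ['/'] <+: path.toList := by
      intro hp
      exact hsw (by simpa [PySem.Chars.startswith_iff] using hp)
    have hBf : matches_supported_route_py_alt path = false := by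
      have hsw' : PySem.Chars.startswith path.toList ['/'] = false := by
        simpa using hsw
      simp [matches_supported_route_py_alt, hsw']
    rw [hBf]
    simp only [Bool.false_eq_true, iff_false]
    intro hA
    apply hns
    rcases hA with h|h|h|h|h|h|(h|h)|(h|h)|(h|h)
    all_goals first
      | exact List.IsPrefix.trans (by decide) h
      | (rw [h]; decide)

-- ===== VERDICT (by name: the statement is the Claim_ definition above) =====
theorem matches_supported_route_py_spec : Claim_equal_matches_supported_route_py := by
  intro path _
  unfold Spec_matches_supported_route_py
  exact pv_ab_eq path
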